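-- pv_equiv track=rewrite | github.com/yminnnx/singhacks-25 | src/shared/audit_trail.py | _identify_compliance_gaps
-- ===== SOURCE A (Python) =====
-- from typing import Dict, List, Any, Optional
-- from enum import Enum
--
-- class EventType(Enum):
--     TRANSACTION_ANALYSIS = "Transaction Analysis"
--     ALERT_CREATED = "Alert Created"
--     ALERT_ACKNOWLEDGED = "Alert Acknowledged"
--     ALERT_ESCALATED = "Alert Escalated"
--     ALERT_RESOLVED = "Alert Resolved"
--     DOCUMENT_UPLOADED = "Document Uploaded"
--     DOCUMENT_PROCESSED = "Document Processed"
--     DOCUMENT_APPROVED = "Document Approved"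
--     DOCUMENT_REJECTED = "Document Rejected"
--     IMAGE_ANALYZED = "Image Analyzed"
--     RULE_TRIGGERED = "Rule Triggered"
--     RULE_CREATED = "Rule Created"
--     RULE_MODIFIED = "Rule Modified"
--     USER_LOGIN = "User Login"
--     USER_LOGOUT = "User Logout"
--     SYSTEM_ERROR = "System Error"
--     COMPLIANCE_REPORT = "Compliance Report"
--
-- def _identify_compliance_gaps(events: List[Dict]) -> List[str]:
--     """Identify potential compliance gaps"""
--     gaps = []
--
--     # Check for various compliance indicators
--     if len([e for e in events if e['event_type'] == EventType.ALERT_RESOLVED.value]) < 10: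
--         gaps.append("Low alert resolution rate")
--
--     if len([e for e in events if e['event_type'] == EventType.DOCUMENT_REJECTED.value]) > 50:
--         gaps.append("High document rejection rate")
--
--     if len([e for e in events if e.get('risk_level') == 'Critical']) > 5:
--         gaps.append("Multiple critical risk incidents")
--
--     return gaps
-- ===== SOURCE B (Python) =====
-- def _identify_compliance_gaps(events):
--     """Identify potential compliance gaps (single pass over events)."""
--     resolved = rejected = critical = 0
--     for e in events:
--         et = e['event_type']
--         if et == "Alert Resolved":
--             resolved += 1
--         if et == "Document Rejected":
--             rejected += 1
--         if e.get('risk_level') == 'Critical':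
--             critical += 1
--     gaps = []
--     if resolved < 10:
--         gaps.append("Low alert resolution rate")
--     if rejected > 50:
--         gaps.append("High document rejection rate")
--     if critical > 5:
--         gaps.append("Multiple critical risk incidents")
--     return gaps
-- ===== Notes on version B (the rewrite author's own statement) =====
-- stated objective: alternative
-- what changed: B replaces A's three separate list-comprehension scans over events with a single loop maintaining three counters, appending the same gap strings under the same threshold tests.
import Mathlib
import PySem

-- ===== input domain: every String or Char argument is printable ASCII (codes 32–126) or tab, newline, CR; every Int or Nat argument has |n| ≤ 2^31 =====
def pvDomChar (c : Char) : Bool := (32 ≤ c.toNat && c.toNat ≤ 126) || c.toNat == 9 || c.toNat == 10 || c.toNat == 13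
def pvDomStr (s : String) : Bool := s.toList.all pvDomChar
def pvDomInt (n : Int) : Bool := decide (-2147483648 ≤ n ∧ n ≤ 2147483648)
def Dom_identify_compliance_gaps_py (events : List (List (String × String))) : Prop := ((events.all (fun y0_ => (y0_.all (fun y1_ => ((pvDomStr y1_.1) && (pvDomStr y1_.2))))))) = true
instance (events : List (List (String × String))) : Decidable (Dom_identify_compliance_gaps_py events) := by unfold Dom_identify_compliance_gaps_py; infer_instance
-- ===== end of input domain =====

-- B replaces A's three separate filter scans with one loop keeping three counters; same thresholds, same order of gap strings (one pass instead of three).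

-- Python dict lookup on an association list: first match (shared lookup helper for both ports).
def pvGetS (e : List (String × String)) (k : String) : Option String :=
  (e.find? (fun p => p.1 == k)).map (·.2)

-- ===== PORT A =====
-- A: gaps = []; three comprehension counts compared to thresholds, appending in order.
def identify_compliance_gaps_py (events : List (List (String × String))) : List String :=
  let gaps : List String := []
  let gaps := if ((events.filter (fun e => pvGetS e "event_type" == some "Alert Resolved")).length : Int) < 10
              then gaps ++ ["Low alert resolution rate"] else gaps
  let gaps := if ((events.filter (fun e => pvGetS e "event_type" == some "Document Rejected")).length : Int) > 50
              then gaps ++ ["High document rejection rate"] else gaps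
  let gaps := if ((events.filter (fun e => pvGetS e "risk_level" == some "Critical")).length : Int) > 5
              then gaps ++ ["Multiple critical risk incidents"] else gaps
  gaps

-- ===== PORT B =====
-- B: one fold over events maintaining (resolved, rejected, critical), then the three threshold tests.
def identify_compliance_gaps_py_alt (events : List (List (String × String))) : List String :=
  let s : Int × Int × Int := events.foldl
    (fun (acc : Int × Int × Int) e =>
      let et := pvGetS e "event_type"
      let r := if et == some "Alert Resolved" then acc.1 + 1 else acc.1
      let j := if et == some "Document Rejected" then acc.2.1 + 1 else acc.2.1
      let c := if pvGetS e "risk_level" == some "Critical" then acc.2.2 + 1 else acc.2.2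
      (r, j, c)) (0, 0, 0)
  let gaps : List String := []
  let gaps := if s.1 < 10 then gaps ++ ["Low alert resolution rate"] else gaps
  let gaps := if s.2.1 > 50 then gaps ++ ["High document rejection rate"] else gaps
  let gaps := if s.2.2 > 5 then gaps ++ ["Multiple critical risk incidents"] else gaps
  gaps

-- ===== PRECONDITION & SPEC =====
-- Pre_ excludes events missing the 'event_type' key, on which the Python A raises KeyError.
def Pre_identify_compliance_gaps_py (events : List (List (String × String))) : Prop :=
  (events.all (fun e => e.any (fun p => p.1 == "event_type"))) = true
instance (events : List (List (String × String))) : Decidable (Pre_identify_compliance_gaps_py events) := by unfold Pre_identify_compliance_gaps_py; infer_instance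

def pvWitness_identify_compliance_gaps_py : (List (List (String × String))) :=
  [[("event_type", "Alert Resolved")], [("event_type", "x"), ("risk_level", "Critical")]]

def Spec_identify_compliance_gaps_py (events : List (List (String × String))) (out : List String) : Prop := out = identify_compliance_gaps_py_alt events
instance (events : List (List (String × String))) (out : List String) : Decidable (Spec_identify_compliance_gaps_py events out) := by unfold Spec_identify_compliance_gaps_py; infer_instance

-- ===== CLAIM (what is proved, stated in full; the proofs are below) =====
def Claim_equal_identify_compliance_gaps_py : Prop := ∀ (events : List (List (String × String))), Dom_identify_compliance_gaps_py events → Pre_identify_compliance_gaps_py events → Spec_identify_compliance_gaps_py events (identify_compliance_gaps_py events)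

-- ===== LEMMAS AND PROOFS =====

-- B's fold adds the three filter-counts to the starting accumulator.
theorem pv_fold_counts (events : List (List (String × String))) :
    ∀ r j c : Int,
      events.foldl
        (fun (acc : Int × Int × Int) e =>
          let et := pvGetS e "event_type"
          let r := if et == some "Alert Resolved" then acc.1 + 1 else acc.1
          let j := if et == some "Document Rejected" then acc.2.1 + 1 else acc.2.1
          let c := if pvGetS e "risk_level" == some "Critical" then acc.2.2 + 1 else acc.2.2
          (r, j, c)) (r, j, c)
      = (r + ((events.filter (fun e => pvGetS e "event_type" == some "Alert Resolved")).length : Int),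
         j + ((events.filter (fun e => pvGetS e "event_type" == some "Document Rejected")).length : Int),
         c + ((events.filter (fun e => pvGetS e "risk_level" == some "Critical")).length : Int)) := by
  induction events with
  | nil => intro r j c; simp
  | cons e rest ih =>
    intro r j c
    simp only [List.foldl_cons, List.filter_cons]
    rw [ih]
    split_ifs <;> simp <;> omega

-- ===== VERDICT (by name: the statement is the Claim_ definition above) =====
theorem identify_compliance_gaps_py_spec : Claim_equal_identify_compliance_gaps_py := by
  intro events _ _
  unfold Spec_identify_compliance_gaps_py identify_compliance_gaps_py identify_compliance_gaps_py_alt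
  rw [pv_fold_counts events 0 0 0]
  simp
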